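-- pv_equiv track=rewrite | github.com/JuanCastellon/CS144-BWT-Project | bwt.py | helperList
-- ===== SOURCE A (Python) =====
-- def helperList(t):
--     temp = sorted(t)
--     helperStr = ''.join(temp)
--     helper_lst = []
--     a = 0
--     c = 0
--     g = 0
--     t = 0
--     d = 0
--     for i in range(len(helperStr)):
--         if helperStr[i] == '$':
--             d += 1
--             helper_lst.append((helperStr[i], d))
--         if helperStr[i] == 'A':
--             a += 1
--             helper_lst.append((helperStr[i], a))
--         if helperStr[i] == 'C':
--             c += 1
--             helper_lst.append((helperStr[i], c))
--         if helperStr[i] == 'G':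
--             g += 1
--             helper_lst.append((helperStr[i], g))
--         if helperStr[i] == 'T':
--             t += 1
--             helper_lst.append((helperStr[i], t))
--
--     return helper_lst
-- ===== SOURCE B (Python) =====
-- def helperList(t):
--     out = []
--     for ch in "$ACGT":
--         n = t.count(ch)
--         out.extend((ch, i) for i in range(1, n + 1))
--     return out
-- ===== Notes on version B (the rewrite author's own statement) =====
-- stated objective: faster
-- what changed: Replaces sorting the whole string and scanning it with five per-character counters by a counting pass over the fixed alphabet $ACGT, emitting (char, 1..count) groups directly in sorted order.
import Mathlib
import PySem

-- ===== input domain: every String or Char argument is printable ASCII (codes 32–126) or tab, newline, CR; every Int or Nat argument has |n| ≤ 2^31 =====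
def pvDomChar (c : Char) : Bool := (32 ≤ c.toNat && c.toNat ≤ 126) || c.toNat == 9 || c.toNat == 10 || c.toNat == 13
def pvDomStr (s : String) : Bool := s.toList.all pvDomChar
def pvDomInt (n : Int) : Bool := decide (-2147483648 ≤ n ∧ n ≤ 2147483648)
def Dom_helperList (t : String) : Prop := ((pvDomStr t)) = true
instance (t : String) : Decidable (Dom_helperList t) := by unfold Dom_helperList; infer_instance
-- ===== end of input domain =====

-- B replaces sort-then-scan by a counting pass over the fixed alphabet "$ACGT" (faster, asymptotic).


-- ===== PORT A =====
-- A's scan of the sorted string with five per-character counters (d a c g t, in A's update order).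
def pvLoopA : List Char → Int → Int → Int → Int → Int → List (String × Int)
  | [], _, _, _, _, _ => []
  | x :: rest, d, a, c, g, t =>
    if x = '$' then (String.ofList [x], d + 1) :: pvLoopA rest (d + 1) a c g t
    else if x = 'A' then (String.ofList [x], a + 1) :: pvLoopA rest d (a + 1) c g t
    else if x = 'C' then (String.ofList [x], c + 1) :: pvLoopA rest d a (c + 1) g t
    else if x = 'G' then (String.ofList [x], g + 1) :: pvLoopA rest d a c (g + 1) t
    else if x = 'T' then (String.ofList [x], t + 1) :: pvLoopA rest d a c g (t + 1)
    else pvLoopA rest d a c g t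

def helperList (t : String) : List (String × Int) :=
  pvLoopA (PySem.List.sorted t.toList (fun x => x) false) 0 0 0 0 0

-- ===== PORT B =====
-- for ch in "$ACGT": emit (ch, 1)..(ch, count)
def helperList_alt (t : String) : List (String × Int) :=
  ['$', 'A', 'C', 'G', 'T'].flatMap (fun ch =>
    (List.range (t.toList.count ch)).map (fun (i : Nat) => (String.ofList [ch], (i : Int) + 1)))

-- ===== PRECONDITION & SPEC =====
def Spec_helperList (t : String) (out : List (String × Int)) : Prop := out = helperList_alt t
instance (t : String) (out : List (String × Int)) : Decidable (Spec_helperList t out) := by unfold Spec_helperList; infer_instance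

-- ===== CLAIM (what is proved, stated in full; the proofs are below) =====
def Claim_equal_helperList : Prop := ∀ (t : String), Dom_helperList t → Spec_helperList t (helperList t)

-- ===== LEMMAS AND PROOFS =====

-- (ch, start+1) .. (ch, start+n)
def pvRank (ch : Char) (start : Int) : Nat → List (String × Int)
  | 0 => []
  | n + 1 => (String.ofList [ch], start + 1) :: pvRank ch (start + 1) n

theorem pvRank_eq_map (ch : Char) (start : Int) (n : Nat) :
    pvRank ch start n = (List.range n).map (fun (i : Nat) => (String.ofList [ch], start + (i : Int) + 1)) := by
  induction n generalizing start with
  | zero => rfl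
  | succ n ih =>
    rw [List.range_succ_eq_map, List.map_cons, List.map_map]
    rw [pvRank, ih]
    congr 1
    · simp
    · refine List.map_congr_left (fun i _ => ?_)
      simp [Function.comp]
      ring

theorem pvLoopA_sorted (s : List Char) (hs : s.Pairwise (· ≤ ·)) :
    ∀ d a c g t : Int,
      pvLoopA s d a c g t =
        pvRank '$' d (s.count '$') ++ pvRank 'A' a (s.count 'A') ++
        pvRank 'C' c (s.count 'C') ++ pvRank 'G' g (s.count 'G') ++
        pvRank 'T' t (s.count 'T') := by
  induction s with
  | nil => intro d a c g t; simp [pvLoopA, pvRank]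
  | cons x rest ih =>
    intro d a c g t
    have hhead : ∀ y ∈ rest, x ≤ y := (List.pairwise_cons.mp hs).1
    have hrest : rest.Pairwise (· ≤ ·) := (List.pairwise_cons.mp hs).2
    have hcz : ∀ ch : Char, ch < x → rest.count ch = 0 := by
      intro ch hlt
      refine List.count_eq_zero.mpr (fun hmem => ?_)
      exact absurd (hhead ch hmem) (not_le.mpr hlt)
    by_cases h1 : x = '$'
    · subst h1
      simp only [pvLoopA, ih hrest]
      simp [pvRank]
    · by_cases h2 : x = 'A'
      · subst h2
        have z1 : rest.count '$' = 0 := hcz '$' (by decide)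
        simp only [pvLoopA, ih hrest]
        simp [z1, pvRank]
      · by_cases h3 : x = 'C'
        · subst h3
          have z1 : rest.count '$' = 0 := hcz '$' (by decide)
          have z2 : rest.count 'A' = 0 := hcz 'A' (by decide)
          simp only [pvLoopA, ih hrest]
          simp [z1, z2, pvRank]
        · by_cases h4 : x = 'G'
          · subst h4
            have z1 : rest.count '$' = 0 := hcz '$' (by decide)
            have z2 : rest.count 'A' = 0 := hcz 'A' (by decide)
            have z3 : rest.count 'C' = 0 := hcz 'C' (by decide)
            simp only [pvLoopA, ih hrest]
            simp [z1, z2, z3, pvRank]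
          · by_cases h5 : x = 'T'
            · subst h5
              have z1 : rest.count '$' = 0 := hcz '$' (by decide)
              have z2 : rest.count 'A' = 0 := hcz 'A' (by decide)
              have z3 : rest.count 'C' = 0 := hcz 'C' (by decide)
              have z4 : rest.count 'G' = 0 := hcz 'G' (by decide)
              simp only [pvLoopA, ih hrest]
              simp [z1, z2, z3, z4, pvRank]
            · simp only [pvLoopA, ih hrest]
              simp [h1, h2, h3, h4, h5]

-- ===== VERDICT (by name: the statement is the Claim_ definition above) =====
theorem helperList_spec : Claim_equal_helperList := by
  intro t _
  unfold Spec_helperList helperList helperList_alt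
  set s := PySem.List.sorted t.toList (fun x => x) false with hsdef
  have hpw : s.Pairwise (· ≤ ·) := PySem.List.sorted_pairwise t.toList (fun x => x)
  have hperm : s.Perm t.toList := PySem.List.sorted_perm t.toList (fun x => x) false
  rw [pvLoopA_sorted s hpw 0 0 0 0 0]
  simp [List.flatMap, hperm.count_eq, pvRank_eq_map]
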